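-- pv_equiv track=rewrite | github.com/ethanrise/docling-batch-processor | core/formula_processor.py | fix_unclosed_formulas
-- ===== SOURCE A (Python) =====
-- def fix_unclosed_formulas(markdown_content: str) -> str:
--     """修复未闭合的公式"""
--     content = markdown_content
--     dollar_positions = [i for i, char in enumerate(content)
--                        if char == '$' and (i == 0 or content[i-1] != '\\')]
--
--     if len(dollar_positions) % 2 == 1:
--         last_pos = dollar_positions[-1]
--         content = content[:last_pos] + content[last_pos+1:]
--
--     return content
-- ===== SOURCE B (Python) =====
-- def fix_unclosed_formulas(markdown_content: str) -> str:
--     """修复未闭合的公式"""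
--     # Split the text at unescaped dollars into segments, then reassemble:
--     # with an odd dollar count (even segment count) drop the last separator.
--     segments = []
--     cur = []
--     prev = ''
--     for ch in markdown_content:
--         if ch == '$' and prev != '\\':
--             segments.append(''.join(cur))
--             cur = []
--         else:
--             cur.append(ch)
--         prev = ch
--     segments.append(''.join(cur))
--     if len(segments) % 2 == 0:
--         return '$'.join(segments[:-1]) + segments[-1]
--     return '$'.join(segments)
-- ===== Notes on version B (the rewrite author's own statement) =====
-- stated objective: alternative
-- what changed: A collects the index positions of unescaped dollars and splices the string at the last one; B never computes positions: it splits the text into segments at unescaped dollars in one pass and reassembles with '$'.join, dropping the final separator when the segment count is even (dollar count odd).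
import Mathlib
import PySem

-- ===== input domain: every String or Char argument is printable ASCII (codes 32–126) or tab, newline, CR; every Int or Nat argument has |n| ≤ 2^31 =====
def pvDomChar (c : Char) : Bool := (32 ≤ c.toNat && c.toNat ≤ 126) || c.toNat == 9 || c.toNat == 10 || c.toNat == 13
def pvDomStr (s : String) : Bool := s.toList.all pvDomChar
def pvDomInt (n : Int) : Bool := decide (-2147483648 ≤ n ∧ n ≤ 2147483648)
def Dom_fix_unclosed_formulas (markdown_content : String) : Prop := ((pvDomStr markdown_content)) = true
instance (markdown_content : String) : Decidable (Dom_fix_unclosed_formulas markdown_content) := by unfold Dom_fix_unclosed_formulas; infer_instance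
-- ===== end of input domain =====

-- B never computes dollar positions: in one pass it splits the text into segments at the
-- unescaped dollars and reassembles with '$'.join, dropping the final separator when the
-- segment count is even (dollar count odd); a same-cost alternative decomposition.

-- ===== PORT A =====
def fix_unclosed_formulas (markdown_content : String) : String :=
  let content := markdown_content.toList
  let dollar_positions :=
    ((PySem.List.enumerate content 0).filter
      (fun ic => ic.2 == '$' && (ic.1 == 0 || !(PySem.List.pyGetD content (ic.1 - 1) ' ' == '\\')))).map (·.1)
  if dollar_positions.length % 2 == 1 then
    -- dollar_positions[-1]: the list is nonempty here (odd length), so the default is unreachable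
    let last_pos := PySem.List.pyGetD dollar_positions (-1) 0
    String.ofList (PySem.List.slice content none (some last_pos) ++
                   PySem.List.slice content (some (last_pos + 1)) none)
  else
    markdown_content

-- ===== PORT B =====
-- one loop step of B: at an unescaped '$' close the current segment, else extend it;
-- state = (segments, cur, prev), exactly B's three loop variables
def pvStepB (st : List (List Char) × List Char × Option Char) (ch : Char) :
    List (List Char) × List Char × Option Char :=
  if ch == '$' && st.2.2 != some '\\' then (st.1 ++ [st.2.1], [], some ch)
  else (st.1, st.2.1 ++ [ch], some ch)

def fix_unclosed_formulas_alt (markdown_content : String) : String :=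
  let st := markdown_content.toList.foldl pvStepB ([], [], none)
  let segments := st.1 ++ [st.2.1]
  if segments.length % 2 == 0 then
    -- '$'.join(segments[:-1]) + segments[-1]; segments is nonempty, so the default is unreachable
    String.ofList (List.intercalate ['$'] segments.dropLast ++ PySem.List.pyGetD segments (-1) [])
  else
    String.ofList (List.intercalate ['$'] segments)

-- ===== PRECONDITION & SPEC =====
def Spec_fix_unclosed_formulas (markdown_content : String) (out : String) : Prop := out = fix_unclosed_formulas_alt markdown_content
instance (markdown_content : String) (out : String) : Decidable (Spec_fix_unclosed_formulas markdown_content out) := by unfold Spec_fix_unclosed_formulas; infer_instance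

-- ===== CLAIM (what is proved, stated in full; the proofs are below) =====
def Claim_equal_fix_unclosed_formulas : Prop := ∀ (markdown_content : String), Dom_fix_unclosed_formulas markdown_content → Spec_fix_unclosed_formulas markdown_content (fix_unclosed_formulas markdown_content)

-- ===== LEMMAS AND PROOFS =====

-- the unescaped-dollar test at position j (on the whole list; defaults are unreachable guards)
def pvIsUD (cs : List Char) (j : Nat) : Bool :=
  cs.getD j ' ' == '$' && (j == 0 || !(cs.getD (j - 1) ' ' == '\\'))

-- the list of unescaped-dollar positions of cs
def pvL (cs : List Char) : List Nat := (List.range' 0 cs.length).filter (pvIsUD cs)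

-- A's comprehension over `enumerate` collects exactly the pvIsUD indexes, as Ints
theorem pvEnumAux (cs : List Char) :
    ∀ (m s : Nat), m = cs.length - s →
    ((PySem.List.enumerate (cs.drop s) (s : Int)).filter
      (fun ic => ic.2 == '$' && (ic.1 == 0 || !(PySem.List.pyGetD cs (ic.1 - 1) ' ' == '\\')))).map (·.1)
    = ((List.range' s m).filter (pvIsUD cs)).map (fun k => Int.ofNat k) := by
  intro m
  induction m with
  | zero =>
    intro s hm
    have hdrop : cs.drop s = [] := List.drop_eq_nil_iff.mpr (by omega)
    simp [hdrop]
  | succ m ih =>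
    intro s hm
    have hs : s < cs.length := by omega
    have hdrop : cs.drop s = cs[s] :: cs.drop (s + 1) := List.drop_eq_getElem_cons hs
    have h1 : cs.getD s ' ' = cs[s] := List.getD_eq_getElem cs ' ' hs
    have hq : (cs[s] == '$' && ((s:Int) == 0 || !(PySem.List.pyGetD cs ((s:Int) - 1) ' ' == '\\')))
        = pvIsUD cs s := by
      unfold pvIsUD
      rcases Nat.eq_zero_or_pos s with h0 | h0
      · subst h0; rw [h1]; simp
      · obtain ⟨t, rfl⟩ : ∃ t, s = t + 1 := ⟨s - 1, by omega⟩
        have h2 : ((t + 1 : Nat) : Int) - 1 = ((t : Nat) : Int) := by push_cast; ring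
        have h3 : PySem.List.pyGetD cs ((t : Nat) : Int) ' ' = cs.getD t ' ' :=
          PySem.List.pyGetD_natCast cs t ' '
        have h4 : (((t + 1 : Nat) : Int) == 0) = false := by
          simp only [beq_eq_false_iff_ne, ne_eq]; omega
        have h5 : ((t + 1 : Nat) == 0) = false := by simp
        rw [h2, h3, h1, h4, h5, Nat.add_sub_cancel]
    have harg : ((s : Int) + 1) = ((s + 1 : Nat) : Int) := by push_cast; ring
    rw [hdrop, List.range'_succ, PySem.List.enumerate_cons, harg]
    simp only [List.filter_cons]
    rw [hq]
    cases h : pvIsUD cs s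
    case false =>
      simp only [Bool.false_eq_true, if_false]
      exact ih (s + 1) (by omega)
    case true =>
      simp only [reduceIte, List.map_cons]
      exact congrArg (List.cons (Int.ofNat s)) (ih (s + 1) (by omega))

-- Python's xs[-1] on a nonempty list is its last element
theorem pvPyGetD_neg_one {α : Type} (xs : List α) (h : xs ≠ []) (d : α) :
    PySem.List.pyGetD xs (-1) d = xs.getLast h := by
  have hlen : 1 ≤ xs.length := List.length_pos_iff.mpr h
  have hidx : PySem.List.pyIdx? xs.length (-1) = some (xs.length - 1) := by
    unfold PySem.List.pyIdx?
    rw [if_neg (by omega), if_pos (by omega)]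
    norm_num
  have hget : xs[xs.length - 1]? = some (xs.getLast h) := by
    rw [List.getElem?_eq_getElem (by omega)]
    exact congrArg some (List.getLast_eq_getElem h).symm
  simp [PySem.List.pyGetD, PySem.List.pyGet?, hidx, hget]

-- intercalate unfolding steps
theorem pvIc_cons2 (a b : List Char) (l : List (List Char)) :
    List.intercalate ['$'] (a :: b :: l) = a ++ '$' :: List.intercalate ['$'] (b :: l) := by
  simp [List.intercalate, List.intersperse]

theorem pvIc_one (a : List Char) : List.intercalate ['$'] [a] = a := by
  simp [List.intercalate, List.intersperse]

-- intercalate over a snoc with a nonempty prefix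
theorem pvIc_snoc (xs : List (List Char)) (y : List Char) (h : xs ≠ []) :
    List.intercalate ['$'] (xs ++ [y]) = List.intercalate ['$'] xs ++ '$' :: y := by
  induction xs with
  | nil => cases h rfl
  | cons a xs ih =>
    cases xs with
    | nil => rw [List.singleton_append, pvIc_cons2, pvIc_one, pvIc_one]
    | cons b xs =>
      have ih' := ih (by simp)
      simp only [List.cons_append] at ih' ⊢
      rw [pvIc_cons2, ih', pvIc_cons2]
      simp

-- extending the last segment extends the join
theorem pvIc_ext (xs : List (List Char)) (y z : List Char) :
    List.intercalate ['$'] (xs ++ [y ++ z]) = List.intercalate ['$'] (xs ++ [y]) ++ z := by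
  cases xs with
  | nil => simp [pvIc_one]
  | cons a l =>
    rw [pvIc_snoc _ _ (by simp), pvIc_snoc _ _ (by simp)]
    simp

-- appending a char keeps pvIsUD at old positions
theorem pvIsUD_append (cs : List Char) (c : Char) (k : Nat) (hk : k < cs.length) :
    pvIsUD (cs ++ [c]) k = pvIsUD cs k := by
  unfold pvIsUD
  simp only [List.getD, List.getElem?_append_left hk,
    List.getElem?_append_left (show k - 1 < cs.length by omega)]

-- pvL of a snoc
theorem pvL_append (cs : List Char) (c : Char) :
    pvL (cs ++ [c]) = pvL cs ++ (if pvIsUD (cs ++ [c]) cs.length then [cs.length] else []) := by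
  unfold pvL
  have hr : List.range' 0 ((cs ++ [c]).length) = List.range' 0 cs.length ++ [cs.length] := by
    simpa using List.range'_concat (s := 0) (n := cs.length) (step := 1)
  rw [hr, List.filter_append]
  congr 1
  · exact List.filter_congr (fun k hk => by
      have := List.mem_range'_1.mp hk
      exact pvIsUD_append cs c k (by omega))
  · cases h : pvIsUD (cs ++ [c]) cs.length <;> simp [List.filter, h]

-- the loop invariant of B's fold
theorem pvInv (cs : List Char) :
    (cs.foldl pvStepB ([], [], none)).2.2 = cs.getLast? ∧
    List.intercalate ['$'] ((cs.foldl pvStepB ([], [], none)).1 ++ [(cs.foldl pvStepB ([], [], none)).2.1]) = cs ∧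
    (cs.foldl pvStepB ([], [], none)).1.length = (pvL cs).length ∧
    ((cs.foldl pvStepB ([], [], none)).1 ≠ [] →
      (pvL cs).getLast? = some (cs.length - (cs.foldl pvStepB ([], [], none)).2.1.length - 1) ∧
      (cs.foldl pvStepB ([], [], none)).2.1.length < cs.length) := by
  induction cs using List.reverseRecOn with
  | nil => simp [pvL, List.intercalate]
  | append_singleton cs c ih =>
    obtain ⟨h1, h2, h3, h4⟩ := ih
    rw [List.foldl_append] at *
    set st := cs.foldl pvStepB ([], [], none) with hst
    simp only [List.foldl_cons, List.foldl_nil]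
    have hcond : (c == '$' && st.2.2 != some '\\') = pvIsUD (cs ++ [c]) cs.length := by
      unfold pvIsUD
      have hce : (cs ++ [c]).getD cs.length ' ' = c := by
        simp [List.getD]
      rw [hce]
      cases cs with
      | nil => simp at h1; rw [h1]; simp
      | cons a as =>
        have hz : ((a :: as).length == 0) = false := by simp
        rw [hz]
        have hg : ((a :: as) ++ [c]).getD ((a :: as).length - 1) ' '
            = (a :: as).getD ((a :: as).length - 1) ' ' := by
          simp only [List.getD, List.getElem?_append_left
            (show (a :: as).length - 1 < (a :: as).length by simp)]
        rw [hg, h1]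
        have hgl : (a :: as).getLast? = some ((a :: as).getLast (by simp)) :=
          List.getLast?_eq_some_getLast (by simp)
        rw [hgl]
        have hgd : (a :: as).getD ((a :: as).length - 1) ' ' = (a :: as).getLast (by simp) := by
          rw [List.getD_eq_getElem _ _ (by simp), List.getLast_eq_getElem]
          rfl
        rw [hgd]
        rcases eq_or_ne ((a :: as).getLast (by simp)) '\\' with he | he <;>
          simp [he, bne]
    rw [pvL_append, ← hcond]
    unfold pvStepB
    cases hc : (c == '$' && st.2.2 != some '\\')
    · -- not a separator: cur is extended by c
      simp only [Bool.false_eq_true, if_false]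
      refine ⟨by simp, by rw [pvIc_ext, h2], by rw [h3]; simp, ?_⟩
      intro hne
      obtain ⟨h4a, h4b⟩ := h4 hne
      refine ⟨?_, by simp only [List.length_append, List.length_cons, List.length_nil]; omega⟩
      simp only [List.append_nil, h4a, List.length_append, List.length_cons, List.length_nil]
      congr 1
      omega
    · -- separator: the current segment is closed, cur restarts empty
      simp only [if_true]
      have hc' : c = '$' := by
        cases hcc : (c == '$')
        · rw [hcc] at hc; simp at hc
        · exact eq_of_beq hcc
      refine ⟨by simp, ?_, ?_, ?_⟩
      · rw [pvIc_snoc _ _ (by simp), h2, hc']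
      · rw [List.length_append, List.length_append, h3]
        simp
      · intro _
        exact ⟨by rw [List.getLast?_concat]; simp, by simp⟩

theorem pvMain (s : String) : fix_unclosed_formulas s = fix_unclosed_formulas_alt s := by
  unfold fix_unclosed_formulas fix_unclosed_formulas_alt
  dsimp only
  set cs := s.toList with hcs
  obtain ⟨h1, h2, h3, h4⟩ := pvInv cs
  set st := cs.foldl pvStepB ([], [], none) with hst
  have hA : ((PySem.List.enumerate cs 0).filter
      (fun ic => ic.2 == '$' && (ic.1 == 0 || !(PySem.List.pyGetD cs (ic.1 - 1) ' ' == '\\')))).map (·.1)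
      = (pvL cs).map (fun k => Int.ofNat k) := by
    have h := pvEnumAux cs cs.length 0 (by omega)
    rw [List.drop_zero] at h
    exact h
  rw [hA]
  simp only [List.length_map]
  have hseglen : (st.1 ++ [st.2.1]).length = st.1.length + 1 := by simp
  by_cases hodd : (pvL cs).length % 2 = 1
  · -- odd dollar count: A splices at the last position, B drops the last separator
    rw [if_pos (by simpa using hodd), if_pos (by rw [hseglen, h3]; simp; omega)]
    have hLne : pvL cs ≠ [] := by intro h; rw [h] at hodd; simp at hodd
    have hsegne : st.1 ≠ [] := by
      intro h
      rw [h] at h3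
      simp at h3
      rw [← h3] at hodd
      simp at hodd
    obtain ⟨h4a, h4b⟩ := h4 hsegne
    set j := cs.length - st.2.1.length - 1 with hj
    have hglast : (pvL cs).getLast hLne = j := by
      have := List.getLast?_eq_some_getLast (l := pvL cs) hLne
      rw [this] at h4a
      exact Option.some_injective _ h4a
    -- A's side: pyGetD at -1 of the mapped list is Int.ofNat j
    have hmapne : (pvL cs).map (fun k => Int.ofNat k) ≠ [] := by
      intro h; exact hLne (List.map_eq_nil_iff.mp h)
    rw [pvPyGetD_neg_one _ hmapne 0]
    have hlast : ((pvL cs).map (fun k => Int.ofNat k)).getLast hmapne = Int.ofNat j := by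
      rw [List.getLast_map]; exact congrArg _ hglast
    rw [hlast]
    -- decompose cs via the invariant
    rw [pvIc_snoc _ _ hsegne] at h2
    set X := List.intercalate ['$'] st.1 with hX
    have hXlen : X.length = j := by
      have : cs.length = X.length + 1 + st.2.1.length := by
        rw [← h2]; simp; omega
      omega
    have hs1 : PySem.List.slice cs none (some (Int.ofNat j)) = cs.take j :=
      PySem.List.slice_to_natCast cs j
    have hs2 : PySem.List.slice cs (some (Int.ofNat j + 1)) none = cs.drop (j + 1) := by
      have he : (Int.ofNat j + 1) = ((j + 1 : Nat) : Int) := by simp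
      rw [he, PySem.List.slice_from_natCast cs (j + 1)]
    rw [hs1, hs2]
    have htake : cs.take j = X := by
      rw [← h2, ← hXlen, List.take_left]
    have hdrop : cs.drop (j + 1) = st.2.1 := by
      rw [← h2]
      have hsplit : X ++ '$' :: st.2.1 = (X ++ ['$']) ++ st.2.1 := by simp
      have hXl : (X ++ ['$']).length = j + 1 := by simp [hXlen]
      rw [hsplit, ← hXl, List.drop_left]
    rw [htake, hdrop]
    -- B's side: dropLast / last of segments
    have hdl : (st.1 ++ [st.2.1]).dropLast = st.1 := by simp
    have hsegne' : st.1 ++ [st.2.1] ≠ [] := by simp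
    rw [hdl, pvPyGetD_neg_one _ hsegne' []]
    rw [List.getLast_append_singleton]
  · -- even dollar count: both return the input unchanged
    rw [if_neg (by simpa using hodd), if_neg (by rw [hseglen, h3]; simp; omega)]
    rw [h2]
    exact String.ofList_toList.symm

-- ===== VERDICT (by name: the statement is the Claim_ definition above) =====
theorem fix_unclosed_formulas_spec : Claim_equal_fix_unclosed_formulas := by
  intro markdown_content _
  unfold Spec_fix_unclosed_formulas
  exact pvMain markdown_content
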